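-- pv_equiv track=rewrite | github.com/bignoldjordanF/community-knapsack | community_knapsack/pbutils.py | aggregate_utilitarian
-- ===== SOURCE A (Python) =====
-- from typing import List, Sequence
--
-- def aggregate_utilitarian(num_projects: int, utilities: Sequence[Sequence[int]]) -> List[int]:
--     """
--     Aggregates the multi-agent utilities over projects by summing the votes for each project into
--     a one-dimensional list of values.
--
--     :param num_projects: The number of projects in the instance (and thus `utilities`).
--     :param utilities: A list of lists of utilities for each voter over the projects.
--     :return: A one-dimensional list of values for each project, i.e., values[i] is the value for project i.
--     """
--     values: List[int] = [0] * num_projects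
--
--     for vid, utility in enumerate(utilities):
--         if len(utility) != num_projects:
--             raise ValueError(f'Voter {vid} has utilities for {len(utility)} projects but expected utilities '
--                              f'for {num_projects} projects.')
--         for pid, u in enumerate(utility):
--             values[pid] += u
--
--     return values
-- ===== SOURCE B (Python) =====
-- def aggregate_utilitarian(num_projects, utilities):
--     if not utilities:
--         return [0] * num_projects
--     for vid, utility in enumerate(utilities):
--         if len(utility) != num_projects:
--             raise ValueError(f'Voter {vid} has utilities for {len(utility)} projects but expected utilities '
--                              f'for {num_projects} projects.')
--     return [sum(col) for col in zip(*utilities)]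
-- ===== Notes on version B (the rewrite author's own statement) =====
-- stated objective: idiomatic
-- what changed: Replaces A's single validate-and-accumulate pass with in-place row-major index updates by a validation-only pass followed by a column-major summation over the transpose (zip(*utilities)), with the empty case handled up front.
import Mathlib
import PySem

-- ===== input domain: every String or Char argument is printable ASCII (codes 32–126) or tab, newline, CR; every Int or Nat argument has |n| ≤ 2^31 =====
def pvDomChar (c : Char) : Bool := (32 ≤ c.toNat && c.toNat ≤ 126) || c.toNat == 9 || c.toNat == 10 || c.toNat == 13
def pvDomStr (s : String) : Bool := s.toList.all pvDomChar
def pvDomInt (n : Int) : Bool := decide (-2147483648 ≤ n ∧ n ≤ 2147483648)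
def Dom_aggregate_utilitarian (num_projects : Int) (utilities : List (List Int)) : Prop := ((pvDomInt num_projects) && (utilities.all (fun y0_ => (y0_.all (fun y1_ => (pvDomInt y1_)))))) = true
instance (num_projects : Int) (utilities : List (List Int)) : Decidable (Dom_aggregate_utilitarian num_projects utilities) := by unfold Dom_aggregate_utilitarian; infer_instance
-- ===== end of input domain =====

-- B replaces A's single validate-and-accumulate pass (row-major in-place index updates) by a
-- validation pass plus a column-major summation over the transpose (zip(*utilities)); idiomatic, same cost.

-- ===== PORT A =====
-- inner loop: for pid, u in enumerate(utility): values[pid] += u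
def pvAddRow (values : List Int) (utility : List Int) : List Int :=
  (utility.foldl (fun (acc : List Int × Nat) u => (acc.1.modify acc.2 (· + u), acc.2 + 1)) (values, 0)).1

-- the ValueError branch (len(utility) != num_projects) raises; those inputs are excluded by Pre_.
def aggregate_utilitarian (num_projects : Int) (utilities : List (List Int)) : List Int :=
  utilities.foldl (fun values utility => pvAddRow values utility) (List.replicate num_projects.toNat 0)

-- ===== PORT B =====
-- zip(*rows): list of columns, stopping at the shortest row (exact Python zip semantics).
def pvZipStar (rows : List (List Int)) : List (List Int) :=
  if h : rows = [] ∨ rows.any (·.isEmpty) then []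
  else (rows.map (·.headI)) :: pvZipStar (rows.map (·.tail))
termination_by rows.headI.length
decreasing_by
  have h1 : rows ≠ [] := fun h0 => h (Or.inl h0)
  have h2 : ¬ rows.any (·.isEmpty) = true := fun h0 => h (Or.inr h0)
  rcases List.exists_cons_of_ne_nil h1 with ⟨r, rs, rfl⟩
  have hr : r ≠ [] := fun h0 => h2 (by simp [h0])
  cases r with
  | nil => exact absurd rfl hr
  | cons a t => simp [List.headI]

-- B: empty case up front, then column sums; B's validation pass only raises, which Pre_ excludes.
def aggregate_utilitarian_alt (num_projects : Int) (utilities : List (List Int)) : List Int :=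
  if utilities = [] then List.replicate num_projects.toNat 0
  else (pvZipStar utilities).map (fun col => col.sum)

-- ===== PRECONDITION & SPEC =====
-- Pre_ excludes exactly the inputs on which A raises ValueError: some voter's row length
-- differing from num_projects.
def Pre_aggregate_utilitarian (num_projects : Int) (utilities : List (List Int)) : Prop :=
  ∀ u ∈ utilities, (u.length : Int) = num_projects
instance (num_projects : Int) (utilities : List (List Int)) : Decidable (Pre_aggregate_utilitarian num_projects utilities) := by unfold Pre_aggregate_utilitarian; infer_instance

def pvWitness_aggregate_utilitarian : Int × List (List Int) := (2, [[1, 2], [3, -1]])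

def Spec_aggregate_utilitarian (num_projects : Int) (utilities : List (List Int)) (out : List Int) : Prop := out = aggregate_utilitarian_alt num_projects utilities
instance (num_projects : Int) (utilities : List (List Int)) (out : List Int) : Decidable (Spec_aggregate_utilitarian num_projects utilities out) := by unfold Spec_aggregate_utilitarian; infer_instance

-- ===== CLAIM (what is proved, stated in full; the proofs are below) =====
def Claim_equal_aggregate_utilitarian : Prop := ∀ (num_projects : Int) (utilities : List (List Int)), Dom_aggregate_utilitarian num_projects utilities → Pre_aggregate_utilitarian num_projects utilities → Spec_aggregate_utilitarian num_projects utilities (aggregate_utilitarian num_projects utilities)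

-- ===== LEMMAS AND PROOFS =====

-- A's indexed inner fold, started at position k on a long-enough list, is pointwise addition past k.
theorem pvAddRow_aux (r : List Int) : ∀ (values : List Int) (k : Nat),
    values.length = k + r.length →
    (r.foldl (fun (acc : List Int × Nat) u => (acc.1.modify acc.2 (· + u), acc.2 + 1)) (values, k)).1
      = values.take k ++ List.zipWith (· + ·) (values.drop k) r := by
  induction r with
  | nil =>
    intro values k h
    simp only [List.length_nil, Nat.add_zero] at h
    simp [List.take_of_length_le (le_of_eq h), List.zipWith_nil_right]
  | cons u r ih =>
    intro values k h
    have hk : k < values.length := by simp only [List.length_cons] at h; omega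
    simp only [List.foldl_cons]
    rw [ih (values.modify k (· + u)) (k + 1) (by rw [List.length_modify]; simp only [List.length_cons] at h; omega)]
    have hM : values.modify k (· + u) = values.take k ++ (values[k] + u) :: values.drop (k + 1) :=
      List.modify_eq_take_cons_drop hk
    have htk : (values.take k).length = k := List.length_take_of_le (le_of_lt hk)
    have hMt : (values.modify k (· + u)).take (k + 1) = values.take k ++ [values[k] + u] := by
      rw [hM, List.take_append, htk]
      simp
    have hMd : (values.modify k (· + u)).drop (k + 1) = values.drop (k + 1) := by
      rw [hM, List.drop_append, htk]
      simp
    rw [hMt, hMd, List.drop_eq_getElem_cons hk]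
    simp [List.zipWith]

theorem pvAddRow_zipWith (values r : List Int) (h : values.length = r.length) :
    pvAddRow values r = List.zipWith (· + ·) values r := by
  unfold pvAddRow
  rw [pvAddRow_aux r values 0 (by simpa using h)]
  simp

-- peeling the head column off the pointwise-sum fold
theorem foldl_zipWith_cons : ∀ (rows : List (List Int)) (a : Int) (v : List Int),
    (∀ r ∈ rows, r ≠ []) →
    rows.foldl (fun acc r => List.zipWith (· + ·) acc r) (a :: v)
      = (a + (rows.map (·.headI)).sum)
        :: (rows.map (·.tail)).foldl (fun acc r => List.zipWith (· + ·) acc r) v := by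
  intro rows
  induction rows with
  | nil => intro a v _; simp
  | cons r rs ih =>
    intro a v hne
    cases r with
    | nil => exact absurd rfl (hne [] (by simp))
    | cons h t =>
      simp only [List.foldl_cons, List.zipWith_cons_cons, List.map_cons]
      rw [ih (a + h) (List.zipWith (· + ·) v t) (fun r hr => hne r (by simp [hr]))]
      simp [List.headI, List.sum_cons, add_assoc]

theorem foldl_zipWith_nil : ∀ (rows : List (List Int)),
    rows.foldl (fun acc r => List.zipWith (· + ·) acc r) [] = [] := by
  intro rows
  induction rows with
  | nil => rfl
  | cons r rs ih => simp [ih]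

-- column sums of the zip equal the pointwise-sum fold, for a nonempty rectangular matrix
theorem zipStar_sum : ∀ (n : Nat) (rows : List (List Int)), rows ≠ [] →
    (∀ r ∈ rows, r.length = n) →
    (pvZipStar rows).map (fun col => col.sum)
      = rows.foldl (fun acc r => List.zipWith (· + ·) acc r) (List.replicate n 0) := by
  intro n
  induction n with
  | zero =>
    intro rows hne hlen
    rw [pvZipStar]
    have : rows.any (·.isEmpty) = true := by
      cases rows with
      | nil => exact absurd rfl hne
      | cons r rs =>
        have : r = [] := List.eq_nil_of_length_eq_zero (hlen r (by simp))
        simp [this]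
    simp [this, foldl_zipWith_nil]
  | succ n ih =>
    intro rows hne hlen
    have hnz : ∀ r ∈ rows, r ≠ [] := by
      intro r hr h0
      have := hlen r hr
      simp [h0] at this
    rw [pvZipStar]
    have hany : rows.any (·.isEmpty) = false := by
      simp only [List.any_eq_false]
      intro r hr
      simpa using hnz r hr
    rw [dif_neg (by simp [hne, hany])]
    simp only [List.map_cons]
    rw [ih (rows.map (·.tail))
        (by cases rows with | nil => exact absurd rfl hne | cons r rs => simp)
        (by intro t ht
            simp only [List.mem_map] at ht
            obtain ⟨r, hr, rfl⟩ := ht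
            have := hlen r hr
            cases r with
            | nil => exact absurd rfl (hnz [] hr)
            | cons a s => simpa using this)]
    rw [List.replicate_succ, foldl_zipWith_cons rows 0 (List.replicate n 0) hnz]
    simp

-- A's fold equals the pointwise-sum fold when the accumulator and all rows have length n
theorem foldl_addRow_eq : ∀ (rows : List (List Int)) (init : List Int) (n : Nat),
    init.length = n → (∀ r ∈ rows, r.length = n) →
    rows.foldl (fun values utility => pvAddRow values utility) init
      = rows.foldl (fun acc r => List.zipWith (· + ·) acc r) init := by
  intro rows
  induction rows with
  | nil => intro _ _ _ _; rfl
  | cons r rs ih =>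
    intro init n hinit hlen
    simp only [List.foldl_cons]
    rw [pvAddRow_zipWith init r (by rw [hinit, hlen r (by simp)])]
    exact ih _ n (by simp [hinit, hlen r (by simp)]) (fun r hr => hlen r (by simp [hr]))

-- ===== VERDICT (by name: the statement is the Claim_ definition above) =====
theorem aggregate_utilitarian_spec : Claim_equal_aggregate_utilitarian := by
  intro num_projects utilities _dom pre
  unfold Spec_aggregate_utilitarian aggregate_utilitarian aggregate_utilitarian_alt
  cases utilities with
  | nil => simp
  | cons r rs =>
    have hnp : (r.length : Int) = num_projects := pre r (by simp)
    have hto : num_projects.toNat = r.length := by omega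
    have hlen : ∀ u ∈ r :: rs, u.length = r.length := by
      intro u hu
      have := pre u hu
      omega
    rw [if_neg (by simp), hto,
        foldl_addRow_eq (r :: rs) (List.replicate r.length 0) r.length (by simp) hlen,
        zipStar_sum r.length (r :: rs) (by simp) hlen]
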